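-- pv_equiv track=rewrite | github.com/virendrapatil24/leetcode-solutions | leetcode/3643-zero-array-transformation-ii/solution.py | can_form_zero_array
-- ===== SOURCE A (Python) =====
-- def can_form_zero_array(nums, queries, k):
--     n = len(nums)
--     freq = [0] * n
--     for idx in range(k):
--         l, r, val = queries[idx]
--         freq[l] += val
--         if r + 1 < n:
--             freq[r + 1] -= val
--     curr_freq = 0
--     for i, num in enumerate(nums):
--         curr_freq += freq[i]
--         if curr_freq < num:
--             return False
--     return True
-- ===== SOURCE B (Python) =====
-- def can_form_zero_array(nums, queries, k):
--     taken = queries[:max(k, 0)]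
--     return all(
--         sum(v for l, r, v in taken if l <= i <= r) >= num
--         for i, num in enumerate(nums)
--     )
-- ===== Notes on version B (the rewrite author's own statement) =====
-- stated objective: simpler
-- what changed: Replaces the difference-array build plus running prefix-sum sweep by a direct per-index check: for each index i, sum the vals of the first k queries whose interval covers i and compare against nums[i].
-- outside the precondition, e.g. on can_form_zero_array([1, 0], [(-1, 0, 1)], 1): A returns False, B returns True; on can_form_zero_array([0, 0, 0], [(2, 0, 1)], 1): A returns False, B returns True
import Mathlib
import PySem

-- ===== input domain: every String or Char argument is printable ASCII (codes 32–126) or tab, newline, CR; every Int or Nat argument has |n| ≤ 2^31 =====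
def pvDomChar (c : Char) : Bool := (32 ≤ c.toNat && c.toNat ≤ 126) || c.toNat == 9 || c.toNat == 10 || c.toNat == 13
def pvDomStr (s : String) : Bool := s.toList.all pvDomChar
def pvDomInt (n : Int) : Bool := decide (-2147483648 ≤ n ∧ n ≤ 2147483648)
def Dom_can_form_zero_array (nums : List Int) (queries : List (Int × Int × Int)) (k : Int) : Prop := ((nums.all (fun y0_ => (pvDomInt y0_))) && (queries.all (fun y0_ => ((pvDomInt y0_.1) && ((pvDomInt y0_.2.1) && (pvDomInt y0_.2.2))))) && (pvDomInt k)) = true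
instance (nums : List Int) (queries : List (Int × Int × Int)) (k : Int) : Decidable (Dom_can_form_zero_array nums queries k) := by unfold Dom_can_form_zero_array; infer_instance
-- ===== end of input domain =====

-- B replaces A's difference-array build plus running prefix-sum sweep by a direct per-index check
-- (sum the covering queries' vals for each index); objective: simpler.

-- ===== PORT A =====
-- body of A's first loop: freq[l] += val; if r + 1 < n: freq[r + 1] -= val
def pvAStep (n : Int) (freq : List Int) (q : Int × Int × Int) : List Int :=
  let freq1 := PySem.List.pySetD freq q.1 (PySem.List.pyGetD freq q.1 0 + q.2.2)
  if q.2.1 + 1 < n then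
    PySem.List.pySetD freq1 (q.2.1 + 1) (PySem.List.pyGetD freq1 (q.2.1 + 1) 0 - q.2.2)
  else freq1

-- A's second loop: running sum curr_freq with early return False
def pvASweep : List (Int × Int) → Int → Bool
  | [], _ => true
  | (num, f) :: rest, curr =>
    if curr + f < num then false else pvASweep rest (curr + f)

def can_form_zero_array (nums : List Int) (queries : List (Int × Int × Int)) (k : Int) : Bool :=
  let n : Int := nums.length
  let freq0 : List Int := List.replicate nums.length 0
  let freq := (PySem.List.pyRange 0 k 1).foldl
    (fun freq idx =>
      match PySem.List.pyGet? queries idx with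
      | some q => pvAStep n freq q
      | none => freq)          -- IndexError in Python: outside Pre_
    freq0
  -- 'for i, num in enumerate(nums): curr += freq[i]'; freq always has len(nums) entries, so zip is exact
  pvASweep (nums.zip freq) 0

-- ===== PORT B =====
-- sum(v for l, r, v in taken if l <= i <= r)
def pvBDec (taken : List (Int × Int × Int)) (i : Int) : Int :=
  ((taken.filter (fun q => decide (q.1 ≤ i) && decide (i ≤ q.2.1))).map (fun q => q.2.2)).sum

def can_form_zero_array_alt (nums : List Int) (queries : List (Int × Int × Int)) (k : Int) : Bool :=
  let taken := PySem.List.slice queries none (some (max k 0))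
  (PySem.List.enumerate nums).all (fun p => decide (pvBDec taken p.1 ≥ p.2))

-- ===== PRECONDITION & SPEC =====
-- Pre_ admits exactly the problem's contract on the first k queries (0 ≤ l ≤ r, l < len(nums), and k ≤ len(queries)
-- when k > 0); outside it A raises IndexError or, on in-range but contract-violating l/r, returns values produced by
-- Python's negative-index wraparound / inverted-interval difference updates — a corner no caller specifies — while B
-- reads l..r as a plain interval.
def Pre_can_form_zero_array (nums : List Int) (queries : List (Int × Int × Int)) (k : Int) : Prop :=
  (0 < k → k ≤ queries.length) ∧
  ∀ q ∈ queries.take k.toNat, 0 ≤ q.1 ∧ q.1 < (nums.length : Int) ∧ q.1 ≤ q.2.1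
instance (nums : List Int) (queries : List (Int × Int × Int)) (k : Int) : Decidable (Pre_can_form_zero_array nums queries k) := by unfold Pre_can_form_zero_array; infer_instance

def pvWitness_can_form_zero_array : List Int × (List (Int × Int × Int)) × Int := ([1, 1], [(0, 1, 2)], 1)

def Spec_can_form_zero_array (nums : List Int) (queries : List (Int × Int × Int)) (k : Int) (out : Bool) : Prop := out = can_form_zero_array_alt nums queries k
instance (nums : List Int) (queries : List (Int × Int × Int)) (k : Int) (out : Bool) : Decidable (Spec_can_form_zero_array nums queries k out) := by unfold Spec_can_form_zero_array; infer_instance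

-- ===== CLAIM (what is proved, stated in full; the proofs are below) =====
def Claim_equal_can_form_zero_array : Prop := ∀ (nums : List Int) (queries : List (Int × Int × Int)) (k : Int), Dom_can_form_zero_array nums queries k → Pre_can_form_zero_array nums queries k → Spec_can_form_zero_array nums queries k (can_form_zero_array nums queries k)

-- ===== LEMMAS AND PROOFS =====

-- A's indexed loop over range(k) is a fold over the first k queries
theorem pvFoldlRangeGet {α β : Type} (xs : List α) (g : β → α → β) (body : β → Nat → β)
    (hbody : ∀ (acc : β) (j : Nat) (h : j < xs.length), body acc j = g acc xs[j])
    (m : Nat) (hm : m ≤ xs.length) (init : β) :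
    (List.range m).foldl body init = (xs.take m).foldl g init := by
  induction m with
  | zero => simp
  | succ m ih =>
    have hm' : m < xs.length := by omega
    have ht : xs.take (m + 1) = xs.take m ++ [xs[m]] := by
      rw [List.take_add_one, List.getElem?_eq_getElem hm']
      rfl
    rw [List.range_succ, List.foldl_append, ih (by omega), ht, List.foldl_append]
    simp [hbody _ m hm']

theorem pvSum_set_add (L : List Int) (j : Nat) (v : Int) (hj : j < L.length) :
    (L.set j (L[j] + v)).sum = L.sum + v := by
  have h1 := List.sum_set L j (L[j] + v)
  have h2 := List.sum_set L j (L[j])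
  rw [List.set_getElem_self] at h2
  simp only [hj, if_pos] at h1 h2
  omega

def pvPrefix (L : List Int) (i : Nat) : Int := (L.take (i + 1)).sum

theorem pvPrefix_set (L : List Int) (j i : Nat) (v : Int) (hj : j < L.length) :
    pvPrefix (L.set j (L[j] + v)) i = pvPrefix L i + if (j : Int) ≤ (i : Int) then v else 0 := by
  unfold pvPrefix
  by_cases h : j ≤ i
  · rw [List.take_set]
    have hjt : j < (L.take (i + 1)).length := by simp; omega
    have hv : L[j] = (L.take (i + 1))[j] := (List.getElem_take).symm
    rw [hv, pvSum_set_add (L.take (i + 1)) j v hjt]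
    have : (j : Int) ≤ (i : Int) := by omega
    simp [this]
  · rw [List.take_set, List.set_eq_of_length_le (by simp; omega)]
    have : ¬ (j : Int) ≤ (i : Int) := by omega
    simp [this]

theorem pvAStep_length (n : Int) (freq : List Int) (q : Int × Int × Int) :
    (pvAStep n freq q).length = freq.length := by
  unfold pvAStep
  split <;> simp [PySem.List.length_pySetD]

theorem pvFoldl_length (n : Int) (qs : List (Int × Int × Int)) (freq : List Int) :
    (qs.foldl (pvAStep n) freq).length = freq.length := by
  induction qs generalizing freq with
  | nil => rfl
  | cons q qs ih => rw [List.foldl_cons, ih, pvAStep_length]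

theorem pvPrefix_step (n : Nat) (freq : List Int) (q : Int × Int × Int) (hlen : freq.length = n)
    (hl0 : 0 ≤ q.1) (hln : q.1 < (n : Int)) (hlr : q.1 ≤ q.2.1) (i : Nat) (hi : i < n) :
    pvPrefix (pvAStep (n : Int) freq q) i
      = pvPrefix freq i + if q.1 ≤ (i : Int) ∧ (i : Int) ≤ q.2.1 then q.2.2 else 0 := by
  obtain ⟨l, r, v⟩ := q
  simp only at hl0 hln hlr ⊢
  have hlf : l < (freq.length : Int) := by rw [hlen]; exact_mod_cast hln
  have hlt : l.toNat < freq.length := by omega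
  simp only [pvAStep]
  rw [PySem.List.pySetD_of_nonneg freq _ hl0, PySem.List.pyGetD_eq_getElem freq 0 hl0 hlf]
  by_cases hr : r + 1 < (n : Int)
  · rw [if_pos hr]
    have hr0 : (0 : Int) ≤ r + 1 := by omega
    have hrf : r + 1 < ((freq.set l.toNat (freq[l.toNat] + v)).length : Int) := by
      simp [hlen]; exact_mod_cast hr
    have hrt : (r + 1).toNat < (freq.set l.toNat (freq[l.toNat] + v)).length := by
      simp at hrf ⊢; omega
    rw [PySem.List.pySetD_of_nonneg _ _ hr0, PySem.List.pyGetD_eq_getElem _ 0 hr0 hrf,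
      sub_eq_add_neg]
    rw [pvPrefix_set _ (r + 1).toNat i (-v) hrt, pvPrefix_set freq l.toNat i v hlt]
    rw [Int.toNat_of_nonneg hl0, Int.toNat_of_nonneg hr0]
    have hin : (i : Int) < (n : Int) := by exact_mod_cast hi
    split_ifs <;> omega
  · rw [if_neg hr]
    rw [pvPrefix_set freq l.toNat i v hlt, Int.toNat_of_nonneg hl0]
    have hin : (i : Int) < (n : Int) := by exact_mod_cast hi
    split_ifs <;> omega

theorem pvBDec_cons (q : Int × Int × Int) (qs : List (Int × Int × Int)) (i : Int) :
    pvBDec (q :: qs) i = (if q.1 ≤ i ∧ i ≤ q.2.1 then q.2.2 else 0) + pvBDec qs i := by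
  unfold pvBDec
  rw [List.filter_cons]
  by_cases h1 : q.1 ≤ i <;> by_cases h2 : i ≤ q.2.1 <;> simp [h1, h2]

theorem pvPrefix_foldl (n : Nat) (qs : List (Int × Int × Int)) (freq : List Int)
    (hlen : freq.length = n)
    (hq : ∀ q ∈ qs, 0 ≤ q.1 ∧ q.1 < (n : Int) ∧ q.1 ≤ q.2.1) (i : Nat) (hi : i < n) :
    pvPrefix (qs.foldl (pvAStep (n : Int)) freq) i = pvPrefix freq i + pvBDec qs i := by
  induction qs generalizing freq with
  | nil => simp [pvBDec]
  | cons q qs ih =>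
    have hq1 := hq q (by simp)
    rw [List.foldl_cons,
      ih (pvAStep (n : Int) freq q) (by rw [pvAStep_length]; exact hlen)
        (fun p hp => hq p (by simp [hp])),
      pvPrefix_step n freq q hlen hq1.1 hq1.2.1 hq1.2.2 i hi, pvBDec_cons]
    ring

theorem pvASweep_iff (pairs : List (Int × Int)) (c : Int) :
    pvASweep pairs c = true ↔
      ∀ (j : Nat) (h : j < pairs.length),
        c + ((pairs.take (j + 1)).map (·.2)).sum ≥ (pairs[j]).1 := by
  induction pairs generalizing c with
  | nil => simp [pvASweep]
  | cons p rest ih =>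
    obtain ⟨num, f⟩ := p
    show (if c + f < num then false else pvASweep rest (c + f)) = true ↔ _
    by_cases hc : c + f < num
    · rw [if_pos hc]
      constructor
      · intro h; cases h
      · intro h
        have := h 0 (by simp)
        simp at this
        omega
    · rw [if_neg hc, ih (c + f)]
      constructor
      · intro h j hj
        match j with
        | 0 => simpa using (by omega : c + f ≥ num)
        | j + 1 =>
          have := h j (by simpa using hj)
          simpa [add_assoc] using this
      · intro h j hj
        have := h (j + 1) (by simpa using hj)
        simpa [add_assoc] using this

theorem pvZipTakeSnd : ∀ (a F : List Int) (m : Nat), F.length = a.length →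
    ((a.zip F).take m).map (fun p => p.2) = F.take m
  | [], F, m, h => by
    have : F = [] := List.length_eq_zero_iff.mp (by simpa using h)
    simp [this]
  | x :: a, [], m, h => by simp at h
  | x :: a, f :: F, 0, h => by simp
  | x :: a, f :: F, m + 1, h => by
    simp only [List.zip_cons_cons, List.take_succ_cons, List.map_cons]
    rw [pvZipTakeSnd a F m (by simpa using h)]

theorem pvPrefix_replicate (n j : Nat) : pvPrefix (List.replicate n (0 : Int)) j = 0 := by
  unfold pvPrefix
  rw [List.take_replicate, List.sum_replicate]
  simp

-- ===== VERDICT (by name: the statement is the Claim_ definition above) =====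
theorem can_form_zero_array_spec : Claim_equal_can_form_zero_array := by
  unfold Claim_equal_can_form_zero_array
  intro nums queries k _ hpre
  obtain ⟨hk, hq⟩ := hpre
  unfold Spec_can_form_zero_array can_form_zero_array can_form_zero_array_alt
  dsimp only
  have hmax : PySem.List.slice queries none (some (max k 0)) = queries.take k.toNat := by
    rw [PySem.List.slice_to queries (le_max_right k 0)]
    congr 1
    omega
  rw [hmax]
  have hloop : (PySem.List.pyRange 0 k 1).foldl
      (fun freq idx => match PySem.List.pyGet? queries idx with
        | some q => pvAStep (nums.length : Int) freq q
        | none => freq) (List.replicate nums.length 0)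
      = (queries.take k.toNat).foldl (pvAStep (nums.length : Int))
          (List.replicate nums.length 0) := by
    by_cases hk0 : k ≤ 0
    · rw [PySem.List.pyRange_one_eq_nil hk0]
      have : k.toNat = 0 := by omega
      simp [this]
    · have hkl : k ≤ (queries.length : Int) := hk (by omega)
      rw [PySem.List.pyRange_one, List.foldl_map]
      simp only [zero_add, PySem.List.pyGet?_natCast]
      rw [show (k - 0).toNat = k.toNat by omega]
      exact pvFoldlRangeGet queries (pvAStep (nums.length : Int)) _
        (fun acc j h => by simp [List.getElem?_eq_getElem h]) k.toNat (by omega) _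
  rw [hloop]
  set n := nums.length with hn
  set qs := queries.take k.toNat with hqs
  set freqF := qs.foldl (pvAStep (n : Int)) (List.replicate n 0) with hF
  have hFlen : freqF.length = n := by rw [hF, pvFoldl_length, List.length_replicate]
  rw [Bool.eq_iff_iff, pvASweep_iff]
  have hzlen : (nums.zip freqF).length = n := by simp [hFlen]; omega
  constructor
  · intro h
    rw [List.all_eq_true]
    intro p hp
    rw [PySem.List.mem_enumerate_iff] at hp
    obtain ⟨j, hj, rfl⟩ := hp
    have hj' : j < (nums.zip freqF).length := by omega
    have := h j hj'
    rw [pvZipTakeSnd nums freqF (j + 1) (by omega), List.getElem_zip] at this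
    have hpf := pvPrefix_foldl n qs (List.replicate n 0) (by simp) hq j hj
    rw [← hF] at hpf
    rw [pvPrefix_replicate] at hpf
    simp only [zero_add] at hpf
    have : pvBDec qs (j : Int) ≥ nums[j] := by
      have := this
      unfold pvPrefix at hpf
      omega
    simpa using this
  · intro h j hj
    rw [pvZipTakeSnd nums freqF (j + 1) (by omega), List.getElem_zip]
    have hjn : j < n := by omega
    have hpf := pvPrefix_foldl n qs (List.replicate n 0) (by simp) hq j hjn
    rw [← hF, pvPrefix_replicate] at hpf
    simp only [zero_add] at hpf
    have hall := List.all_eq_true.mp h (((j : Nat) : Int), nums[j])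
      (by rw [PySem.List.mem_enumerate_iff]; exact ⟨j, hjn, by simp⟩)
    simp only [decide_eq_true_eq] at hall
    unfold pvPrefix at hpf
    omega
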